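-- pv_equiv track=rewrite | github.com/Karatsuban/Advent_of_code | 2015/day12-2.py | do_rep
-- ===== SOURCE A (Python) =====
-- def do_rep(J, term):
--     S_rep = ""
--     L_idx = []
--     term_rep_idx = []
--     for a in range(len(J)):
--         if J[a] in "[]{}":
--             S_rep += J[a]
--             L_idx.append(a)
--         if J[a:a+len(term)] == term:
--             term_rep_idx.append(len(S_rep)) # idx of the term in the representation string
--             S_rep += "#"
--             L_idx.append(a)
--     return S_rep, L_idx, term_rep_idx
-- ===== SOURCE B (Python) =====
-- def do_rep(J, term):
--     # stage 1: collect bracket positions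
--     br = [a for a, ch in enumerate(J) if ch in "[]{}"]
--     # stage 2: collect term occurrence positions with str.find
--     occ = []
--     i = J.find(term)
--     while 0 <= i < len(J):
--         occ.append(i)
--         i = J.find(term, i + 1)
--     # stage 3: two-pointer merge of the two sorted event lists (bracket wins ties)
--     parts, L_idx, term_rep_idx = [], [], []
--     i = j = 0
--     while i < len(br) or j < len(occ):
--         if j == len(occ) or (i < len(br) and br[i] <= occ[j]):
--             parts.append(J[br[i]])
--             L_idx.append(br[i])
--             i += 1
--         else:
--             term_rep_idx.append(len(parts))
--             parts.append("#")
--             L_idx.append(occ[j])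
--             j += 1
--     return "".join(parts), L_idx, term_rep_idx
-- ===== Notes on version B (the rewrite author's own statement) =====
-- stated objective: faster
-- what changed: B stages the work: it first collects the bracket positions and (separately, via repeated str.find) the term-occurrence positions as two sorted lists, then builds the output by a two-pointer merge of those event lists with a final join, instead of A's single pass that slice-compares the term at every index and grows the result string by repeated concatenation.
import Mathlib
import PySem

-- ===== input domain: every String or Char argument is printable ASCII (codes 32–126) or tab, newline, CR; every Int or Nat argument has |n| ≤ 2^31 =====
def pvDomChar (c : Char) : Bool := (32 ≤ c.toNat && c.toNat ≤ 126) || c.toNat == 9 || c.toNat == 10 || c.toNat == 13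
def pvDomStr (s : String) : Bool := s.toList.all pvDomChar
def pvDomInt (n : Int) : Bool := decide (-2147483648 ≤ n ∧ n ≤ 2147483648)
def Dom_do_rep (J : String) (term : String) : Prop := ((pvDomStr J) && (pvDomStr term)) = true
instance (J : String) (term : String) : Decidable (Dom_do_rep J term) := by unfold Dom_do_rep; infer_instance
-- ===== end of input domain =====

-- B replaces A's single slice-comparing pass by three stages: collect bracket positions,
-- collect term-occurrence positions with str.find, then two-pointer-merge the two sorted
-- event lists (bracket wins ties) into the result.

-- ===== PORT A =====
-- the characters "[]{}" of A's membership test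
def pvBrackets : List Char := ['[', ']', '{', '}']

-- one iteration of A's `for a in range(len(J))` body
def pvStepA (js t : List Char) (st : List Char × List Int × List Int) (a : Int) :
    List Char × List Int × List Int :=
  let c := PySem.List.pyGetD js a ' '   -- J[a]; always in range since a ∈ range(len(J))
  let st := if PySem.Chars.isIn [c] pvBrackets then (st.1 ++ [c], st.2.1 ++ [a], st.2.2) else st
  if PySem.List.slice js (some a) (some (a + PySem.List.len t)) == t then
    (st.1 ++ ['#'], st.2.1 ++ [a], st.2.2 ++ [(st.1.length : Int)])
  else st

def do_rep (J : String) (term : String) : String × List Int × List Int :=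
  let js := J.toList
  let t := term.toList
  let st := (PySem.List.pyRange 0 (PySem.List.len js) 1).foldl (pvStepA js t) ([], [], [])
  (String.ofList st.1, st.2.1, st.2.2)

-- ===== PORT B =====
-- B's `while 0 <= i < len(J): occ.append(i); i = J.find(term, i + 1)` loop; the fuel
-- len(J)+1 always suffices (the appended position strictly increases each round)
def pvOccLoop (js t : List Char) : Nat → Int → List Int → List Int
  | 0, _, acc => acc
  | fuel+1, i, acc =>
      if 0 ≤ i ∧ i < (js.length : Int) then
        pvOccLoop js t fuel (PySem.Chars.findFrom js t (i + 1) none) (acc ++ [i])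
      else acc

-- B's two-pointer merge of the bracket list and the occurrence list (bracket wins ties)
def pvMerge (js : List Char) : List Int → List Int →
    List (List Char) × List Int × List Int → List (List Char) × List Int × List Int
  | [], [], st => st
  | b :: bs, [], st =>
      pvMerge js bs [] (st.1 ++ [[PySem.List.pyGetD js b ' ']], st.2.1 ++ [b], st.2.2)
  | [], o :: os, st =>
      pvMerge js [] os (st.1 ++ [['#']], st.2.1 ++ [o], st.2.2 ++ [(st.1.length : Int)])
  | b :: bs, o :: os, st =>
      if b ≤ o then
        pvMerge js bs (o :: os) (st.1 ++ [[PySem.List.pyGetD js b ' ']], st.2.1 ++ [b], st.2.2)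
      else
        pvMerge js (b :: bs) os (st.1 ++ [['#']], st.2.1 ++ [o], st.2.2 ++ [(st.1.length : Int)])
  termination_by bs os _ => bs.length + os.length

def do_rep_alt (J : String) (term : String) : String × List Int × List Int :=
  let js := J.toList
  let t := term.toList
  let br := ((PySem.List.enumerate js).filter
      (fun p => PySem.Chars.isIn [p.2] pvBrackets)).map (fun p => p.1)
  let occ := pvOccLoop js t (js.length + 1) (PySem.Chars.findFrom js t 0 none) []
  let st := pvMerge js br occ ([], [], [])
  (String.ofList (PySem.Chars.join [] st.1), st.2.1, st.2.2)

-- ===== PRECONDITION & SPEC =====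
def Spec_do_rep (J : String) (term : String) (out : String × List Int × List Int) : Prop := out = do_rep_alt J term
instance (J : String) (term : String) (out : String × List Int × List Int) : Decidable (Spec_do_rep J term out) := by unfold Spec_do_rep; infer_instance

-- ===== CLAIM (what is proved, stated in full; the proofs are below) =====
def Claim_equal_do_rep : Prop := ∀ (J : String) (term : String), Dom_do_rep J term → Spec_do_rep J term (do_rep J term)

-- ===== LEMMAS AND PROOFS =====

-- bracket test at index a (as A reads the character)
def pvBrB (js : List Char) (a : Nat) : Bool :=
  PySem.Chars.isIn [PySem.List.pyGetD js (a : Int) ' '] pvBrackets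

-- occurrence test at index a
def pvOccB (js t : List Char) (a : Nat) : Bool := decide (t <+: js.drop a)

-- the (at most two) events at index a, bracket first
def pvEvents (js t : List Char) (a : Nat) : List (Int × Bool) :=
  (if pvBrB js a then [((a : Int), false)] else []) ++
  (if pvOccB js t a then [((a : Int), true)] else [])

-- event lists of indices i, i+1, …, n-1
def pvEvL (js t : List Char) (i : Nat) : List (Int × Bool) :=
  (List.range' i (js.length - i)).flatMap (pvEvents js t)
def pvBrL (js : List Char) (i : Nat) : List Int :=
  ((List.range' i (js.length - i)).filter (pvBrB js)).map (fun (a : Nat) => (a : Int))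
def pvOccL (js t : List Char) (i : Nat) : List Int :=
  ((List.range' i (js.length - i)).filter (pvOccB js t)).map (fun (a : Nat) => (a : Int))

-- processing one event, on A's state and on B's state
def pvEvStepA (js : List Char) (st : List Char × List Int × List Int) (e : Int × Bool) :
    List Char × List Int × List Int :=
  if e.2 then (st.1 ++ ['#'], st.2.1 ++ [e.1], st.2.2 ++ [(st.1.length : Int)])
  else (st.1 ++ [PySem.List.pyGetD js e.1 ' '], st.2.1 ++ [e.1], st.2.2)
def pvEvStepB (js : List Char) (st : List (List Char) × List Int × List Int) (e : Int × Bool) :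
    List (List Char) × List Int × List Int :=
  if e.2 then (st.1 ++ [['#']], st.2.1 ++ [e.1], st.2.2 ++ [(st.1.length : Int)])
  else (st.1 ++ [[PySem.List.pyGetD js e.1 ' ']], st.2.1 ++ [e.1], st.2.2)

-- A's slice comparison is the prefix test at that index
lemma pv_slice_prefix (js t : List Char) (k : Nat) :
    (PySem.List.slice js (some (k : Int)) (some ((k : Int) + (t.length : Int))) == t) = pvOccB js t k := by
  rw [PySem.List.slice_natCast_add]
  simp only [pvOccB]
  by_cases h : t <+: js.drop k
  · simp [h, (List.prefix_iff_eq_take.mp h).symm]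
  · simp only [h, decide_false, beq_eq_false_iff_ne, ne_eq]
    intro hc; exact h (List.prefix_iff_eq_take.mpr hc.symm)

-- A's per-index step processes the events at that index
lemma pv_stepA_events (js t : List Char) (st : List Char × List Int × List Int) (a : Nat) :
    pvStepA js t st (a : Int) = (pvEvents js t a).foldl (pvEvStepA js) st := by
  simp only [pvStepA, pvEvents, PySem.List.len_eq, pv_slice_prefix]
  cases h1 : pvBrB js a <;> cases h2 : pvOccB js t a <;>
    simp_all [pvBrB, pvEvStepA]

-- A's fold over any index list is the event fold over the flattened events
lemma pv_foldA_events (js t : List Char) (l : List Nat) (st : List Char × List Int × List Int) :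
    (l.map (fun a : Nat => (a : Int))).foldl (pvStepA js t) st =
      (l.flatMap (pvEvents js t)).foldl (pvEvStepA js) st := by
  induction l generalizing st with
  | nil => rfl
  | cons a l ih =>
    simp only [List.map_cons, List.foldl_cons, List.flatMap_cons, List.foldl_append]
    rw [pv_stepA_events]; exact ih _

-- the find loop emits exactly the occurrence positions ≥ the current start, in order
lemma pv_occLoop_eq (js t : List Char) :
    ∀ (fuel : Nat) (k : Nat) (acc : List Int), k ≤ js.length → js.length ≤ fuel + k →
      pvOccLoop js t fuel (PySem.Chars.findFrom js t (k : Int) none) acc =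
        acc ++ pvOccL js t k := by
  intro fuel
  induction fuel with
  | zero =>
    intro k acc hk hf
    have hkn : k = js.length := by omega
    simp [pvOccLoop, pvOccL, hkn]
  | succ fuel ih =>
    intro k acc hk hf
    set r := PySem.Chars.findFrom js t (k : Int) none with hr
    by_cases hneg : r = -1
    · -- no further occurrence: the loop stops and the remaining filter is empty
      have hninf := (PySem.Chars.findFrom_natCast_eq_neg_one_iff js t k hk).mp (by rw [← hr]; exact hneg)
      have hfil : (List.range' k (js.length - k)).filter (pvOccB js t) = [] := by
        rw [List.filter_eq_nil_iff]
        intro a ha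
        have hka : k ≤ a := by
          have := List.mem_range'_1.mp ha; omega
        simp only [pvOccB, decide_eq_true_eq]
        intro hpre
        apply hninf
        have hj : js.drop a = (js.drop k).drop (a - k) := by
          rw [List.drop_drop]; congr 1; omega
        rw [hj] at hpre
        exact hpre.isInfix.trans (List.drop_suffix _ _).isInfix
      simp [pvOccLoop, hneg, pvOccL, hfil]
    · obtain ⟨hkr, hpre, hmin⟩ := PySem.Chars.findFrom_natCast_spec js t k hk (by rw [← hr]; exact hneg)
      rw [← hr] at hkr hpre hmin
      have hreq := PySem.Chars.findFrom_natCast js t k hk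
      rw [← hr] at hreq
      have hfind : PySem.Chars.find (js.drop k) t ≠ -1 := by
        intro hc; rw [hc] at hreq; simp at hreq; exact hneg hreq
      have hfle := PySem.Chars.find_le_length (js.drop k) t
      have hfnn : 0 ≤ PySem.Chars.find (js.drop k) t := by
        have := PySem.Chars.neg_one_le_find (js.drop k) t
        rcases lt_or_eq_of_le this with h | h
        · omega
        · exact absurd h.symm hfind
      have hrn : r ≤ (js.length : Int) := by
        rw [hreq, if_neg hfind]
        rw [List.length_drop] at hfle
        omega
      have hrnn : 0 ≤ r := by omega
      by_cases hlt : r < (js.length : Int)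
      · -- one more occurrence at r: emit it and continue from r+1
        simp only [pvOccLoop, hr]
        rw [if_pos ⟨by rw [← hr]; omega, by rw [← hr]; exact hlt⟩]
        have hcast : (r + 1) = ((r.toNat + 1 : Nat) : Int) := by omega
        rw [← hr, hcast, ih (r.toNat + 1) (acc ++ [r]) (by omega) (by omega)]
        -- split the remaining index range at r
        have hsplit : List.range' k (js.length - k) =
            List.range' k (r.toNat - k) ++ List.range' r.toNat (js.length - r.toNat) := by
          have h1 : r.toNat = k + (r.toNat - k) := by omega
          have h2 : js.length - k = (r.toNat - k) + (js.length - r.toNat) := by omega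
          rw [h2, ← List.range'_append_1, ← h1]
        have hfil1 : (List.range' k (r.toNat - k)).filter (pvOccB js t) = [] := by
          rw [List.filter_eq_nil_iff]
          intro a ha
          have hb := List.mem_range'_1.mp ha
          simp only [pvOccB, decide_eq_true_eq]
          exact hmin a (by omega) (by omega)
        have hsucc : List.range' r.toNat (js.length - r.toNat) =
            r.toNat :: List.range' (r.toNat + 1) (js.length - (r.toNat + 1)) := by
          have : js.length - r.toNat = (js.length - (r.toNat + 1)) + 1 := by omega
          rw [this, List.range'_succ]
        have hocc_r : pvOccB js t r.toNat = true := by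
          simp only [pvOccB, decide_eq_true_eq]; exact hpre
        simp only [pvOccL, hsplit, List.filter_append, hfil1, List.nil_append, hsucc,
          List.filter_cons, hocc_r, if_pos, List.map_cons, List.append_assoc]
        congr 2
        · simp; omega
      · -- r = len(J) (empty term): the guard stops the loop; nothing below len(J) is left
        have hrlen : r = (js.length : Int) := by omega
        simp only [pvOccLoop, hr]
        rw [if_neg (by rw [← hr]; omega)]
        have hfil : (List.range' k (js.length - k)).filter (pvOccB js t) = [] := by
          rw [List.filter_eq_nil_iff]
          intro a ha
          have hb := List.mem_range'_1.mp ha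
          simp only [pvOccB, decide_eq_true_eq]
          exact hmin a (by omega) (by omega)
        simp [pvOccL, hfil]

-- a bracket that is not after every pending occurrence is merged next
lemma pv_merge_br (js : List Char) (b : Int) (bs os : List Int)
    (st : List (List Char) × List Int × List Int) (h : ∀ o ∈ os, b ≤ o) :
    pvMerge js (b :: bs) os st =
      pvMerge js bs os (st.1 ++ [[PySem.List.pyGetD js b ' ']], st.2.1 ++ [b], st.2.2) := by
  cases os with
  | nil => simp only [pvMerge]
  | cons o os =>
    simp only [pvMerge]
    rw [if_pos (h o (List.mem_cons_self ..))]

-- an occurrence that is before every pending bracket is merged next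
lemma pv_merge_occ (js : List Char) (o : Int) (bs os : List Int)
    (st : List (List Char) × List Int × List Int) (h : ∀ b ∈ bs, o < b) :
    pvMerge js bs (o :: os) st =
      pvMerge js bs os (st.1 ++ [['#']], st.2.1 ++ [o], st.2.2 ++ [(st.1.length : Int)]) := by
  cases bs with
  | nil => simp only [pvMerge]
  | cons b bs =>
    have hb := h b (List.mem_cons_self ..)
    simp only [pvMerge]
    rw [if_neg (by omega)]

-- merging the bracket and occurrence lists processes the events in index order
lemma pv_merge_events (js t : List Char) :
    ∀ (k i : Nat), js.length - i = k → i ≤ js.length →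
      ∀ st, pvMerge js (pvBrL js i) (pvOccL js t i) st = (pvEvL js t i).foldl (pvEvStepB js) st := by
  intro k
  induction k with
  | zero =>
    intro i h0 hi st
    simp [pvBrL, pvOccL, pvEvL, h0, pvMerge]
  | succ k ih =>
    intro i h0 hi st
    have hilt : i < js.length := by omega
    have hn1 : js.length - (i + 1) = k := by omega
    have hrr : List.range' i (js.length - i) = i :: List.range' (i + 1) (js.length - (i + 1)) := by
      rw [h0, hn1, List.range'_succ]
    have hbb : ∀ x ∈ pvBrL js (i + 1), (i : Int) < x := by
      intro x hx
      simp only [pvBrL, List.mem_map, List.mem_filter] at hx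
      obtain ⟨a, ⟨ha, _⟩, rfl⟩ := hx
      have h1 := (List.mem_range'_1.mp ha).1
      exact_mod_cast by omega
    have hoo : ∀ x ∈ pvOccL js t (i + 1), (i : Int) < x := by
      intro x hx
      simp only [pvOccL, List.mem_map, List.mem_filter] at hx
      obtain ⟨a, ⟨ha, _⟩, rfl⟩ := hx
      have h1 := (List.mem_range'_1.mp ha).1
      exact_mod_cast by omega
    have hbrl : pvBrL js i = (if pvBrB js i then [(i : Int)] else []) ++ pvBrL js (i + 1) := by
      simp only [pvBrL, hrr, List.filter_cons]
      cases pvBrB js i <;> simp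
    have hoccl : pvOccL js t i = (if pvOccB js t i then [(i : Int)] else []) ++ pvOccL js t (i + 1) := by
      simp only [pvOccL, hrr, List.filter_cons]
      cases pvOccB js t i <;> simp
    have hev : pvEvL js t i = pvEvents js t i ++ pvEvL js t (i + 1) := by
      simp only [pvEvL, hrr, List.flatMap_cons]
    rw [hbrl, hoccl, hev, List.foldl_append]
    by_cases hB : pvBrB js i = true <;> by_cases hO : pvOccB js t i = true
    · -- bracket and occurrence at i: bracket is merged first, then the occurrence
      rw [if_pos hB, if_pos hO, List.singleton_append, List.singleton_append]
      rw [pv_merge_br js (i : Int) _ _ st (by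
        intro o ho
        rcases List.mem_cons.mp ho with h | h
        · exact le_of_eq h.symm
        · exact le_of_lt (hoo o h))]
      rw [pv_merge_occ js (i : Int) _ _ _ (fun b hb => hbb b hb)]
      rw [ih (i + 1) hn1 (by omega)]
      simp [pvEvents, hB, hO, pvEvStepB]
    · -- bracket only at i
      rw [if_pos hB, if_neg hO, List.singleton_append, List.nil_append]
      rw [pv_merge_br js (i : Int) _ _ st (fun o ho => le_of_lt (hoo o ho))]
      rw [ih (i + 1) hn1 (by omega)]
      simp [pvEvents, hB, hO, pvEvStepB]
    · -- occurrence only at i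
      rw [if_neg hB, if_pos hO, List.singleton_append, List.nil_append]
      rw [pv_merge_occ js (i : Int) _ _ st (fun b hb => hbb b hb)]
      rw [ih (i + 1) hn1 (by omega)]
      simp [pvEvents, hB, hO, pvEvStepB]
    · -- no event at i
      rw [if_neg hB, if_neg hO, List.nil_append, List.nil_append]
      rw [ih (i + 1) hn1 (by omega)]
      simp [pvEvents, hB, hO]

-- the two event folds stay related: B's parts list is A's string mapped to singletons
lemma pv_fold_rel (js : List Char) (ev : List (Int × Bool)) :
    ∀ (S : List Char) (L T : List Int),
      ev.foldl (pvEvStepB js) (S.map (fun c => [c]), L, T) =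
        (fun r => (r.1.map (fun c => [c]), r.2.1, r.2.2)) (ev.foldl (pvEvStepA js) (S, L, T)) := by
  induction ev with
  | nil => intro S L T; rfl
  | cons e ev ih =>
    intro S L T
    simp only [List.foldl_cons]
    have hstep : pvEvStepB js (S.map (fun c => [c]), L, T) e =
        (fun r => (r.1.map (fun c => [c]), r.2.1, r.2.2)) (pvEvStepA js (S, L, T) e) := by
      cases h : e.2 <;> simp [pvEvStepA, pvEvStepB, h]
    rw [hstep]
    rcases pvEvStepA js (S, L, T) e with ⟨S', L', T'⟩
    exact ih S' L' T'

-- B's bracket comprehension is the filtered index list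
lemma pv_br_eq (js : List Char) :
    ((PySem.List.enumerate js).filter (fun p => PySem.Chars.isIn [p.2] pvBrackets)).map
        (fun p => p.1) = pvBrL js 0 := by
  rw [PySem.List.enumerate_eq_map_pyRange js ' ', PySem.List.len_eq, PySem.List.pyRange_zero_natCast,
    List.filter_map, List.map_map, List.filter_map, List.map_map]
  simp only [pvBrL, Nat.sub_zero, ← List.range_eq_range']
  simp only [Function.comp_def]
  have hf : List.filter (pvBrB js) (List.range js.length) =
      List.filter (fun (x : Nat) => PySem.Chars.isIn [PySem.List.pyGetD js (↑x) ' '] pvBrackets)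
        (List.range js.length) :=
    List.filter_congr (fun a _ => by simp [pvBrB])
  rw [hf]

-- ===== VERDICT (by name: the statement is the Claim_ definition above) =====
theorem do_rep_spec : Claim_equal_do_rep := by
  intro J term _
  simp only [Spec_do_rep, do_rep, do_rep_alt]
  set js := J.toList with hjs
  set t := term.toList with ht
  rw [pv_br_eq]
  have hocc : pvOccLoop js t (js.length + 1) (PySem.Chars.findFrom js t 0 none) [] =
      pvOccL js t 0 := by
    have h := pv_occLoop_eq js t (js.length + 1) 0 [] (Nat.zero_le _) (by omega)
    simpa using h
  rw [hocc, pv_merge_events js t (js.length - 0) 0 rfl (Nat.zero_le _)]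
  have hA : PySem.List.pyRange 0 (PySem.List.len js) 1 =
      (List.range js.length).map (fun k : Nat => (k : Int)) := by
    rw [PySem.List.len_eq, PySem.List.pyRange_zero_natCast]
  rw [hA, pv_foldA_events]
  have hr : List.range js.length = List.range' 0 (js.length - 0) := by
    simp [List.range_eq_range']
  rw [hr]
  have hrel := pv_fold_rel js (pvEvL js t 0) [] [] []
  simp only [List.map_nil] at hrel
  rw [pvEvL] at hrel ⊢
  rw [hrel]
  rcases ((List.range' 0 (js.length - 0)).flatMap (pvEvents js t)).foldl (pvEvStepA js) ([], [], [])
    with ⟨S, L, T⟩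
  simp [PySem.Chars.join_nil_singletons]
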